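-- pv_equiv track=rewrite | github.com/LauraTavora/Germinare-Tech | Semana9_desafios/Exercício3.py | filtrando_clientes
-- ===== SOURCE A (Python) =====
-- valor_compras = 500
--
-- def filtrando_clientes(clientes, minimo_idade, maximo_idade, localizacao_desejada, compras):
--     clientes_idade = []
--     clientes_localizacao = []
--     clientes_compras = []
--
--     for cliente in clientes:
--         nome, idade, localizacao, compras = cliente
--
--         if minimo_idade <= idade and idade <= maximo_idade:
--             clientes_idade.append(cliente)
--         if localizacao == localizacao_desejada:
--             clientes_localizacao.append(cliente)
--         if compras >= valor_compras:
--             clientes_compras.append(cliente)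
--
--     return clientes_compras, clientes_localizacao, clientes_idade
-- ===== SOURCE B (Python) =====
-- valor_compras = 500
--
-- def filtrando_clientes(clientes, minimo_idade, maximo_idade, localizacao_desejada, compras):
--     # Three independent single-predicate passes instead of one fused loop.
--     clientes_compras = []
--     for nome, idade, localizacao, compras_cliente in clientes:
--         if compras_cliente >= valor_compras:
--             clientes_compras.append((nome, idade, localizacao, compras_cliente))
--
--     clientes_localizacao = []
--     for nome, idade, localizacao, compras_cliente in clientes:
--         if localizacao == localizacao_desejada:
--             clientes_localizacao.append((nome, idade, localizacao, compras_cliente))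
--
--     clientes_idade = []
--     for nome, idade, localizacao, compras_cliente in clientes:
--         if minimo_idade <= idade <= maximo_idade:
--             clientes_idade.append((nome, idade, localizacao, compras_cliente))
--
--     return clientes_compras, clientes_localizacao, clientes_idade
-- ===== Notes on version B (the rewrite author's own statement) =====
-- stated objective: alternative
-- what changed: Replaced the single fused loop maintaining three accumulators with three independent single-predicate filtering passes (purchases >= module-level valor_compras, location match, age range), returned in the same order.
import Mathlib
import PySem

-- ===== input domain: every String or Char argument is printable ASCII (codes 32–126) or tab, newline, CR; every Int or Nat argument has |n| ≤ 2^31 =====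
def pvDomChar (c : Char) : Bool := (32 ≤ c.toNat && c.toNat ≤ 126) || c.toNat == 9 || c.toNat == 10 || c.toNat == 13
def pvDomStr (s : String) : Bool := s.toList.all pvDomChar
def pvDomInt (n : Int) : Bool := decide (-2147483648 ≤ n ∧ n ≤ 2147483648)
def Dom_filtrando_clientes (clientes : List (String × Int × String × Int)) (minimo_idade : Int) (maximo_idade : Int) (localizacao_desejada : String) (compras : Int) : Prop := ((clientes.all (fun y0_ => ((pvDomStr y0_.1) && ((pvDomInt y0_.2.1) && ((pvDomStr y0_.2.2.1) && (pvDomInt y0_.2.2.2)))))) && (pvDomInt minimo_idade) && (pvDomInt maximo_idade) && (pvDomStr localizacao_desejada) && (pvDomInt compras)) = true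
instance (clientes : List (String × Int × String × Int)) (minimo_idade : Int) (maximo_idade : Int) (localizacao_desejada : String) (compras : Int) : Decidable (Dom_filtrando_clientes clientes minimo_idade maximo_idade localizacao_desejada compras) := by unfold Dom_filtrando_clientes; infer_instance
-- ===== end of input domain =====

-- B replaces A's single fused loop (three accumulators) with three independent
-- single-predicate passes; same return value ("alternative" objective, no speed claim).

-- ===== PORT A =====
-- A: one loop over clientes appending each client to up to three accumulator lists;
-- the `compras` parameter is shadowed by tuple unpacking, and the purchases test
-- compares against the module-level global valor_compras = 500.
-- the loop body: unpack the client, test the three conditions, append to each accumulator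
def pvStepA (minimo_idade maximo_idade : Int) (localizacao_desejada : String)
    (acc : (List (String × Int × String × Int)) × (List (String × Int × String × Int)) × (List (String × Int × String × Int)))
    (cliente : String × Int × String × Int) :
    (List (String × Int × String × Int)) × (List (String × Int × String × Int)) × (List (String × Int × String × Int)) :=
  let idade := cliente.2.1
  let localizacao := cliente.2.2.1
  let compras_v := cliente.2.2.2
  let ci := if minimo_idade ≤ idade ∧ idade ≤ maximo_idade then acc.1 ++ [cliente] else acc.1
  let cl := if localizacao == localizacao_desejada then acc.2.1 ++ [cliente] else acc.2.1
  let cc := if compras_v ≥ 500 then acc.2.2 ++ [cliente] else acc.2.2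
  (ci, cl, cc)

def filtrando_clientes (clientes : List (String × Int × String × Int)) (minimo_idade : Int) (maximo_idade : Int) (localizacao_desejada : String) (compras : Int) : (List (String × Int × String × Int)) × (List (String × Int × String × Int)) × (List (String × Int × String × Int)) :=
  let res := clientes.foldl (pvStepA minimo_idade maximo_idade localizacao_desejada) ([], [], [])
  (res.2.2, res.2.1, res.1)

-- ===== PORT B =====
-- B-side helpers: one structural-recursion pass per predicate (Source B's three loops).
def pvAltCompras : List (String × Int × String × Int) → List (String × Int × String × Int)
  | [] => []
  | c :: rest => if c.2.2.2 ≥ 500 then c :: pvAltCompras rest else pvAltCompras rest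

def pvAltLoc (localizacao_desejada : String) : List (String × Int × String × Int) → List (String × Int × String × Int)
  | [] => []
  | c :: rest => if c.2.2.1 == localizacao_desejada then c :: pvAltLoc localizacao_desejada rest else pvAltLoc localizacao_desejada rest

def pvAltIdade (minimo_idade maximo_idade : Int) : List (String × Int × String × Int) → List (String × Int × String × Int)
  | [] => []
  | c :: rest => if minimo_idade ≤ c.2.1 ∧ c.2.1 ≤ maximo_idade then c :: pvAltIdade minimo_idade maximo_idade rest else pvAltIdade minimo_idade maximo_idade rest

def filtrando_clientes_alt (clientes : List (String × Int × String × Int)) (minimo_idade : Int) (maximo_idade : Int) (localizacao_desejada : String) (compras : Int) : (List (String × Int × String × Int)) × (List (String × Int × String × Int)) × (List (String × Int × String × Int)) :=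
  (pvAltCompras clientes, pvAltLoc localizacao_desejada clientes, pvAltIdade minimo_idade maximo_idade clientes)

-- ===== PRECONDITION & SPEC =====
def Spec_filtrando_clientes (clientes : List (String × Int × String × Int)) (minimo_idade : Int) (maximo_idade : Int) (localizacao_desejada : String) (compras : Int) (out : (List (String × Int × String × Int)) × (List (String × Int × String × Int)) × (List (String × Int × String × Int))) : Prop := out = filtrando_clientes_alt clientes minimo_idade maximo_idade localizacao_desejada compras
-- instance search for DecidableEq of the output triple exceeds the default term-size
-- limit, so the decision procedure is assembled by hand from the standard instances.
def pvDecEqCliList : DecidableEq (List (String × Int × String × Int)) := fun a b => List.hasDecEq a b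
def pvDecEqOut : DecidableEq ((List (String × Int × String × Int)) × (List (String × Int × String × Int)) × (List (String × Int × String × Int))) :=
  @instDecidableEqProd _ _ pvDecEqCliList (@instDecidableEqProd _ _ pvDecEqCliList pvDecEqCliList)
instance (clientes : List (String × Int × String × Int)) (minimo_idade : Int) (maximo_idade : Int) (localizacao_desejada : String) (compras : Int) (out : (List (String × Int × String × Int)) × (List (String × Int × String × Int)) × (List (String × Int × String × Int))) : Decidable (Spec_filtrando_clientes clientes minimo_idade maximo_idade localizacao_desejada compras out) := by unfold Spec_filtrando_clientes; exact pvDecEqOut _ _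

-- ===== CLAIM (what is proved, stated in full; the proofs are below) =====
def Claim_equal_filtrando_clientes : Prop := ∀ (clientes : List (String × Int × String × Int)) (minimo_idade : Int) (maximo_idade : Int) (localizacao_desejada : String) (compras : Int), Dom_filtrando_clientes clientes minimo_idade maximo_idade localizacao_desejada compras → Spec_filtrando_clientes clientes minimo_idade maximo_idade localizacao_desejada compras (filtrando_clientes clientes minimo_idade maximo_idade localizacao_desejada compras)

-- ===== LEMMAS AND PROOFS =====
-- A's fold, started from arbitrary accumulators, yields each accumulator followed by
-- the corresponding single-predicate pass of B.
lemma pvFold_eq (minimo_idade maximo_idade : Int) (localizacao_desejada : String) :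
    ∀ (cs : List (String × Int × String × Int)) (a b c : List (String × Int × String × Int)),
      cs.foldl (pvStepA minimo_idade maximo_idade localizacao_desejada) (a, b, c)
      = (a ++ pvAltIdade minimo_idade maximo_idade cs,
         b ++ pvAltLoc localizacao_desejada cs,
         c ++ pvAltCompras cs) := by
  intro cs
  induction cs with
  | nil => intro a b c; simp [pvAltIdade, pvAltLoc, pvAltCompras]
  | cons x xs ih =>
    intro a b c
    rw [List.foldl_cons,
        show pvStepA minimo_idade maximo_idade localizacao_desejada (a, b, c) x
          = (if minimo_idade ≤ x.2.1 ∧ x.2.1 ≤ maximo_idade then a ++ [x] else a,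
             if x.2.2.1 == localizacao_desejada then b ++ [x] else b,
             if x.2.2.2 ≥ 500 then c ++ [x] else c) from rfl]
    simp only [pvAltIdade, pvAltLoc, pvAltCompras]
    split_ifs <;> simp [ih]

-- ===== VERDICT (by name: the statement is the Claim_ definition above) =====
theorem filtrando_clientes_spec : Claim_equal_filtrando_clientes := by
  intro clientes minimo_idade maximo_idade localizacao_desejada compras _
  unfold Spec_filtrando_clientes filtrando_clientes filtrando_clientes_alt
  rw [pvFold_eq]
  simp
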